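-- pv_equiv track=rewrite | github.com/nahowo/Algorithm-study | 백준/Gold/17143. 낚시왕/낚시왕.py | moveShark
-- ===== SOURCE A (Python) =====
-- shift = lambda x: -1 * x
--
-- def moveShark(s, d, rc, pos): # s: 속도, d: 방향, rc: 가로면 r, 세로면 c 크기
--     s = s % (rc * 2 - 2)
--     dr = 1 if 2 <= d <= 3 else -1
--
--     for _ in range(s):
--         if pos + dr < 0:
--             pos = 1
--             dr = shift(dr)
--         elif pos + dr > rc - 1:
--             pos = rc - 2
--             dr = shift(dr)
--         else:
--             pos += dr
--     if 1 <= d <= 2: # 상하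
--         if dr == -1:
--             d = 1
--         else:
--             d = 2
--     else: # 좌우
--         if dr == -1:
--             d = 4
--         else:
--             d = 3
--     return d, pos
-- ===== SOURCE B (Python) =====
-- def moveShark(s, d, rc, pos):
--     dr = 1 if 2 <= d <= 3 else -1
--     s = s % (rc * 2 - 2)
--     if s > 0:
--         # one explicit step puts pos inside [0, rc-1]
--         if pos + dr < 0:
--             pos, dr = 1, -dr
--         elif pos + dr > rc - 1:
--             pos, dr = rc - 2, -dr
--         else:
--             pos = pos + dr
--         t = s - 1
--         if t > 0:
--             # remaining steps by reflection: unfold on the period 2*(rc-1)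
--             L = rc - 1
--             y = (pos if dr == 1 else 2 * L - pos) % (2 * L)
--             y = (y + t) % (2 * L)
--             if y == 0:
--                 pos, dr = 0, -1
--             elif y <= L:
--                 pos, dr = y, 1
--             else:
--                 pos, dr = 2 * L - y, -1
--     if 1 <= d <= 2:
--         d = 1 if dr == -1 else 2
--     else:
--         d = 4 if dr == -1 else 3
--     return d, pos
-- ===== Notes on version B (the rewrite author's own statement) =====
-- stated objective: faster
-- what changed: Replaces A's step-by-step bounce simulation (up to 2*rc-3 iterations) with at most one explicit normalizing step followed by a closed-form reflection of the position on the period 2*(rc-1) using modular arithmetic.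
import Mathlib
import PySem

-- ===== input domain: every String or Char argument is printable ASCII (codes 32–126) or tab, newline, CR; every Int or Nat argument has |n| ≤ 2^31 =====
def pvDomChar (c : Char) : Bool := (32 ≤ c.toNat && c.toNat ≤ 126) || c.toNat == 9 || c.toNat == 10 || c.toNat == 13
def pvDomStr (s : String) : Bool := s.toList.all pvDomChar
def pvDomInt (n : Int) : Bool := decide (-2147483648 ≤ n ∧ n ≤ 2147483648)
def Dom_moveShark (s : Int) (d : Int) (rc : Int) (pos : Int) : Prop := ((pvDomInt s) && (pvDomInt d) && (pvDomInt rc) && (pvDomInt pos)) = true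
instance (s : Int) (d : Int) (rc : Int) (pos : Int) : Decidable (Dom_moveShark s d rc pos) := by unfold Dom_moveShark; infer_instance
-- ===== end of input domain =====

-- B replaces A's step-by-step bounce loop (up to 2*rc-3 iterations) by at most one explicit
-- normalizing step followed by a closed-form reflection on the period 2*(rc-1): O(1) vs O(rc).

-- ===== PORT A =====
def pyShift (x : Int) : Int := -1 * x

def moveSharkLoop : Nat → Int → Int → Int → Int × Int
  | 0, _, pos, dr => (pos, dr)
  | n+1, rc, pos, dr =>
      if pos + dr < 0 then moveSharkLoop n rc 1 (pyShift dr)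
      else if pos + dr > rc - 1 then moveSharkLoop n rc (rc - 2) (pyShift dr)
      else moveSharkLoop n rc (pos + dr) dr

def moveShark (s : Int) (d : Int) (rc : Int) (pos : Int) : List Int :=
  let s1 := PySem.Int.mod s (rc * 2 - 2)
  let dr : Int := if 2 ≤ d ∧ d ≤ 3 then 1 else -1
  let st := moveSharkLoop s1.toNat rc pos dr      -- for _ in range(s): …
  let d' : Int := if 1 ≤ d ∧ d ≤ 2 then (if st.2 = -1 then 1 else 2)
                  else (if st.2 = -1 then 4 else 3)
  [d', st.1]

-- ===== PORT B =====
def moveSharkAltStep (rc : Int) (pos : Int) (dr : Int) : Int × Int :=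
  if pos + dr < 0 then (1, -dr)
  else if pos + dr > rc - 1 then (rc - 2, -dr)
  else (pos + dr, dr)

def moveSharkAltFold (rc : Int) (pos : Int) (dr : Int) (t : Int) : Int × Int :=
  let L := rc - 1
  let y0 := PySem.Int.mod (if dr = 1 then pos else 2 * L - pos) (2 * L)
  let y := PySem.Int.mod (y0 + t) (2 * L)
  if y = 0 then (0, -1)
  else if y ≤ L then (y, 1)
  else (2 * L - y, -1)

def moveShark_alt (s : Int) (d : Int) (rc : Int) (pos : Int) : List Int :=
  let dr : Int := if 2 ≤ d ∧ d ≤ 3 then 1 else -1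
  let s1 := PySem.Int.mod s (rc * 2 - 2)
  let st :=
    if s1 > 0 then
      let st1 := moveSharkAltStep rc pos dr
      let t := s1 - 1
      if t > 0 then moveSharkAltFold rc st1.1 st1.2 t else st1
    else (pos, dr)
  let d' : Int := if 1 ≤ d ∧ d ≤ 2 then (if st.2 = -1 then 1 else 2)
                  else (if st.2 = -1 then 4 else 3)
  [d', st.1]

-- ===== PRECONDITION & SPEC =====
-- Pre_ excludes exactly rc = 1, where the Python A raises ZeroDivisionError (s % 0).
def Pre_moveShark (s : Int) (d : Int) (rc : Int) (pos : Int) : Prop := rc ≠ 1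
instance (s : Int) (d : Int) (rc : Int) (pos : Int) : Decidable (Pre_moveShark s d rc pos) := by unfold Pre_moveShark; infer_instance
def pvWitness_moveShark : Int × Int × Int × Int := (7, 2, 5, 3)

def Spec_moveShark (s : Int) (d : Int) (rc : Int) (pos : Int) (out : List Int) : Prop := out = moveShark_alt s d rc pos
instance (s : Int) (d : Int) (rc : Int) (pos : Int) (out : List Int) : Decidable (Spec_moveShark s d rc pos out) := by unfold Spec_moveShark; infer_instance

-- ===== CLAIM (what is proved, stated in full; the proofs are below) =====
def Claim_equal_moveShark : Prop := ∀ (s : Int) (d : Int) (rc : Int) (pos : Int), Dom_moveShark s d rc pos → Pre_moveShark s d rc pos → Spec_moveShark s d rc pos (moveShark s d rc pos)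

-- ===== LEMMAS AND PROOFS =====

-- Encoding of a bouncing state (pos, dr) as an unfolded coordinate on the circle of length 2*(rc-1).
def Epos (rc : Int) (pos : Int) (dr : Int) : Int := if dr = 1 then pos else 2 * (rc - 1) - pos

-- Decoding of an unfolded coordinate y ∈ [0, 2*(rc-1)) back to (pos, dr) (valid after ≥ 1 in-range step).
def Dec (rc : Int) (y : Int) : Int × Int :=
  if y = 0 then (0, -1) else if y ≤ rc - 1 then (y, 1) else (2 * (rc - 1) - y, -1)

def stepA (rc : Int) (pos : Int) (dr : Int) : Int × Int :=
  if pos + dr < 0 then (1, pyShift dr)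
  else if pos + dr > rc - 1 then (rc - 2, pyShift dr)
  else (pos + dr, dr)

lemma loop_succ (n : Nat) (rc pos dr : Int) :
    moveSharkLoop (n+1) rc pos dr = moveSharkLoop n rc (stepA rc pos dr).1 (stepA rc pos dr).2 := by
  simp only [moveSharkLoop, stepA]
  split_ifs <;> rfl

lemma stepA_eq_altStep (rc pos dr : Int) : stepA rc pos dr = moveSharkAltStep rc pos dr := by
  simp [stepA, moveSharkAltStep, pyShift]

lemma stepA_bounds (rc pos dr : Int) (h2 : 2 ≤ rc) (hdr : dr = 1 ∨ dr = -1) :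
    0 ≤ (stepA rc pos dr).1 ∧ (stepA rc pos dr).1 ≤ rc - 1 ∧
      ((stepA rc pos dr).2 = 1 ∨ (stepA rc pos dr).2 = -1) := by
  unfold stepA pyShift
  rcases hdr with h | h <;> subst h <;> split_ifs <;> simp <;> omega

lemma stepA_dec (rc pos dr : Int) (h2 : 2 ≤ rc) (h0 : 0 ≤ pos) (h1 : pos ≤ rc - 1)
    (hdr : dr = 1 ∨ dr = -1) :
    stepA rc pos dr = Dec rc ((Epos rc pos dr + 1) % (2 * (rc - 1))) := by
  have hM : (0:Int) < 2 * (rc - 1) := by omega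
  rcases hdr with h | h <;> subst h
  · -- dr = 1
    by_cases hb : pos + 1 > rc - 1
    · -- pos = rc - 1, bounce down
      have hs : stepA rc pos 1 = (rc - 2, -1) := by
        unfold stepA pyShift
        rw [if_neg (by omega : ¬ pos + (1:Int) < 0), if_pos hb]; norm_num
      have hpos : pos = rc - 1 := by omega
      subst hpos
      rw [hs]
      by_cases hL : rc = 2
      · subst hL; norm_num [Epos, Dec]
      · have hlt : (rc - 1 + 1) % (2 * (rc - 1)) = rc - 1 + 1 :=
          Int.emod_eq_of_lt (by omega) (by omega)
        simp only [Epos, if_true, hlt, Dec]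
        rw [if_neg (by omega), if_neg (by omega)]
        simp only [Prod.mk.injEq, and_true]
        omega
    · -- interior move up
      have hs : stepA rc pos 1 = (pos + 1, 1) := by
        unfold stepA pyShift
        rw [if_neg (by omega : ¬ pos + (1:Int) < 0), if_neg hb]
      rw [hs]
      have hlt : (pos + 1) % (2 * (rc - 1)) = pos + 1 :=
        Int.emod_eq_of_lt (by omega) (by omega)
      simp only [Epos, if_true, hlt, Dec]
      rw [if_neg (by omega), if_pos (by omega)]
  · -- dr = -1
    by_cases hb : pos + -1 < 0
    · -- pos = 0, bounce up
      have hs : stepA rc pos (-1) = (1, 1) := by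
        unfold stepA pyShift
        rw [if_pos hb]; norm_num
      have hpos : pos = 0 := by omega
      subst hpos
      rw [hs]
      have h1m : (2 * (rc - 1) - 0 + 1) % (2 * (rc - 1)) = 1 := by
        rw [show 2 * (rc - 1) - 0 + 1 = 1 + 2 * (rc - 1) * 1 by ring, Int.add_mul_emod_self_left]
        exact Int.emod_eq_of_lt (by omega) (by omega)
      simp only [Epos, if_neg (by norm_num : ¬ (-1:Int) = 1), h1m, Dec]
      rw [if_neg (by omega), if_pos (by omega)]
    · -- interior move down
      have hb2 : ¬ (pos + -1 > rc - 1) := by omega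
      have hs : stepA rc pos (-1) = (pos + -1, -1) := by
        unfold stepA pyShift
        rw [if_neg hb, if_neg hb2]
      rw [hs]
      by_cases hp : pos = 1
      · subst hp
        have h0m : (2 * (rc - 1) - 1 + 1) % (2 * (rc - 1)) = 0 := by
          rw [show 2 * (rc - 1) - 1 + 1 = 0 + 2 * (rc - 1) * 1 by ring, Int.add_mul_emod_self_left]
          exact Int.emod_eq_of_lt (by omega) (by omega)
        simp only [Epos, if_neg (by norm_num : ¬ (-1:Int) = 1), h0m, Dec, if_pos rfl]
        norm_num
      · have hlt : (2 * (rc - 1) - pos + 1) % (2 * (rc - 1)) = 2 * (rc - 1) - pos + 1 :=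
          Int.emod_eq_of_lt (by omega) (by omega)
        simp only [Epos, if_neg (by norm_num : ¬ (-1:Int) = 1), hlt, Dec]
        rw [if_neg (by omega), if_neg (by omega)]
        simp only [Prod.mk.injEq, and_true]
        omega

lemma stepA_E (rc pos dr : Int) (h2 : 2 ≤ rc) (h0 : 0 ≤ pos) (h1 : pos ≤ rc - 1)
    (hdr : dr = 1 ∨ dr = -1) :
    Epos rc (stepA rc pos dr).1 (stepA rc pos dr).2 % (2 * (rc - 1)) =
      (Epos rc pos dr + 1) % (2 * (rc - 1)) := by
  have hM : (0:Int) < 2 * (rc - 1) := by omega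
  rcases hdr with h | h <;> subst h
  · by_cases hb : pos + 1 > rc - 1
    · have hs : stepA rc pos 1 = (rc - 2, -1) := by
        unfold stepA pyShift
        rw [if_neg (by omega : ¬ pos + (1:Int) < 0), if_pos hb]; norm_num
      rw [hs]
      simp only [Epos, if_true, if_neg (by norm_num : ¬ (-1:Int) = 1)]
      congr 1; omega
    · have hs : stepA rc pos 1 = (pos + 1, 1) := by
        unfold stepA pyShift
        rw [if_neg (by omega : ¬ pos + (1:Int) < 0), if_neg hb]
      rw [hs]
      simp only [Epos, if_true]
  · by_cases hb : pos + -1 < 0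
    · have hs : stepA rc pos (-1) = (1, 1) := by
        unfold stepA pyShift
        rw [if_pos hb]; norm_num
      have hpos : pos = 0 := by omega
      subst hpos
      rw [hs]
      simp only [Epos, if_true, if_neg (by norm_num : ¬ (-1:Int) = 1)]
      rw [show 2 * (rc - 1) - 0 + 1 = 1 + 2 * (rc - 1) * 1 by ring, Int.add_mul_emod_self_left]
    · have hb2 : ¬ (pos + -1 > rc - 1) := by omega
      have hs : stepA rc pos (-1) = (pos + -1, -1) := by
        unfold stepA pyShift
        rw [if_neg hb, if_neg hb2]
      rw [hs]
      simp only [Epos, if_neg (by norm_num : ¬ (-1:Int) = 1)]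
      congr 1; omega

lemma loop_closed (rc : Int) (h2 : 2 ≤ rc) :
    ∀ (n : Nat) (pos dr : Int), 0 ≤ pos → pos ≤ rc - 1 → (dr = 1 ∨ dr = -1) →
      moveSharkLoop (n+1) rc pos dr = Dec rc ((Epos rc pos dr + (n+1)) % (2 * (rc - 1))) := by
  intro n
  induction n with
  | zero =>
    intro pos dr h0 h1 hdr
    rw [loop_succ]
    simpa [moveSharkLoop] using stepA_dec rc pos dr h2 h0 h1 hdr
  | succ m ih =>
    intro pos dr h0 h1 hdr
    rw [loop_succ]
    obtain ⟨b0, b1, bdr⟩ := stepA_bounds rc pos dr h2 hdr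
    rw [ih _ _ b0 b1 bdr]
    congr 1
    rw [Int.add_emod (Epos rc (stepA rc pos dr).1 (stepA rc pos dr).2) _,
        stepA_E rc pos dr h2 h0 h1 hdr, ← Int.add_emod]
    congr 1
    push_cast
    ring

lemma loop_eq_alt (s rc pos dr : Int) (hrc : rc ≠ 1) (hdr : dr = 1 ∨ dr = -1) :
    moveSharkLoop (PySem.Int.mod s (rc * 2 - 2)).toNat rc pos dr =
      (if PySem.Int.mod s (rc * 2 - 2) > 0 then
        (if PySem.Int.mod s (rc * 2 - 2) - 1 > 0 then
          moveSharkAltFold rc (moveSharkAltStep rc pos dr).1 (moveSharkAltStep rc pos dr).2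
            (PySem.Int.mod s (rc * 2 - 2) - 1)
        else moveSharkAltStep rc pos dr)
      else (pos, dr)) := by
  set M : Int := rc * 2 - 2 with hM_def
  have hMne : M ≠ 0 := by omega
  set s1 := PySem.Int.mod s M with hs1_def
  by_cases hpos : s1 > 0
  · -- s1 > 0 forces M > 0 (hence rc ≥ 2): with M < 0 Python's mod is ≤ 0
    have hMpos : 0 < M := by
      rcases lt_trichotomy M 0 with hneg | hz | hposM
      · have := (PySem.Int.mod_neg_bounds s hneg).2
        rw [← hs1_def] at this; omega
      · exact absurd hz hMne
      · exact hposM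
    have h2 : 2 ≤ rc := by omega
    have hs1lt : s1 < M := by rw [hs1_def]; exact PySem.Int.mod_lt s hMpos
    rw [if_pos hpos]
    -- peel the first iteration of A's loop
    obtain ⟨k, hk⟩ : ∃ k : Nat, s1.toNat = k + 1 := ⟨s1.toNat - 1, by omega⟩
    rw [hk, loop_succ]
    obtain ⟨b0, b1, bdr⟩ := stepA_bounds rc pos dr h2 hdr
    by_cases ht : s1 - 1 > 0
    · -- at least one more step: closed form
      obtain ⟨m, hm⟩ : ∃ m : Nat, k = m + 1 := ⟨k - 1, by omega⟩
      rw [hm, loop_closed rc h2 m _ _ b0 b1 bdr]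
      rw [if_pos ht, ← stepA_eq_altStep]
      unfold Dec Epos
      simp only [moveSharkAltFold]
      rw [PySem.Int.mod_eq_emod_of_pos (by omega : (0:Int) < 2 * (rc - 1)),
          PySem.Int.mod_eq_emod_of_pos (by omega : (0:Int) < 2 * (rc - 1))]
      have harg : ((if (stepA rc pos dr).2 = 1 then (stepA rc pos dr).1
            else 2 * (rc - 1) - (stepA rc pos dr).1) % (2 * (rc - 1)) + (s1 - 1)) % (2 * (rc - 1)) =
          ((if (stepA rc pos dr).2 = 1 then (stepA rc pos dr).1
            else 2 * (rc - 1) - (stepA rc pos dr).1) + (↑m + 1)) % (2 * (rc - 1)) := by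
        rw [Int.add_emod, Int.emod_emod_of_dvd _ (dvd_refl _), ← Int.add_emod]
        congr 1
        omega
      rw [harg]
    · -- exactly one step: s1 = 1, k = 0
      have hk0 : k = 0 := by omega
      rw [hk0, if_neg ht, ← stepA_eq_altStep]
      rfl
  · -- s1 ≤ 0: A's range is empty, B keeps the initial state
    rw [if_neg hpos]
    have h0 : s1.toNat = 0 := by omega
    rw [h0]
    rfl

-- ===== VERDICT (by name: the statement is the Claim_ definition above) =====
theorem moveShark_spec : Claim_equal_moveShark := by
  intro s d rc pos _ hpre
  unfold Pre_moveShark at hpre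
  have hdr : (if 2 ≤ d ∧ d ≤ 3 then (1:Int) else -1) = 1 ∨
      (if 2 ≤ d ∧ d ≤ 3 then (1:Int) else -1) = -1 := by split_ifs <;> simp
  simp only [Spec_moveShark, moveShark, moveShark_alt]
  rw [loop_eq_alt s rc pos _ hpre hdr]
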